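-- pv_equiv track=rewrite | github.com/ice-waves/suanfa | seat_num.py | seatNum
-- ===== SOURCE A (Python) =====
-- from typing import List
--
-- def seatNum(seatTag: List) -> int:
--     seatTagLen = len(seatTag)
--
--     # 边界值
--     if seatTagLen == 0:
--       return 0
--     elif seatTagLen == 1:
--         if seatTag[0] == 0:
--           return 1
--         else:
--             return 0
--
--     seatTagNew = seatTag.copy()
--
--     for i in range(seatTagLen):
--         if i == 0:
--             if seatTagNew[i] == 0:
--                 if seatTagNew[i+1] == 1:
--                     continue
--                 else:
--                     seatTagNew[i] = 1
--         else:
--             if seatTagNew[i-1] == 1: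
--                continue
--             else:
--                 if i+1 <= seatTagLen-1:
--                     if seatTagNew[i+1] == 1:
--                         continue
--                     else:
--                         seatTagNew[i] = 1
--                 else:
--                     seatTagNew[i] = 1
--     avaiableNum = 0
--
--     for x in range(seatTagLen):
--         if seatTag[x] != seatTagNew[x]:
--             avaiableNum += 1
--
--     return avaiableNum
-- ===== SOURCE B (Python) =====
-- def seatNum(seatTag):
--     # closed form per maximal run of non-1 cells: a run of length L placed
--     # between blockers admits (L - 1 + left_open + right_open) // 2 new seats,
--     # where the left end is open only for a run starting at index 0 with value 0,
--     # and the right end is open only for a run reaching the end of the list.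
--     n = len(seatTag)
--     total, i = 0, 0
--     while i < n:
--         if seatTag[i] == 1:
--             i += 1
--         else:
--             j = i
--             while j < n and seatTag[j] != 1:
--                 j += 1
--             left_open = 1 if (i == 0 and seatTag[0] == 0) else 0
--             right_open = 1 if j == n else 0
--             total += (j - i - 1 + left_open + right_open) // 2
--             i = j
--     return total
-- ===== Notes on version B (the rewrite author's own statement) =====
-- stated objective: alternative
-- what changed: A simulates the greedy cell by cell on a copied list and then diffs copy against original; B never simulates: it splits the list into maximal runs of non-1 cells and adds a closed-form count (L - 1 + left_open + right_open) // 2 per run, where the left end is open only for a run starting at index 0 with value 0 and the right end only for a run reaching the end of the list.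
import Mathlib
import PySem

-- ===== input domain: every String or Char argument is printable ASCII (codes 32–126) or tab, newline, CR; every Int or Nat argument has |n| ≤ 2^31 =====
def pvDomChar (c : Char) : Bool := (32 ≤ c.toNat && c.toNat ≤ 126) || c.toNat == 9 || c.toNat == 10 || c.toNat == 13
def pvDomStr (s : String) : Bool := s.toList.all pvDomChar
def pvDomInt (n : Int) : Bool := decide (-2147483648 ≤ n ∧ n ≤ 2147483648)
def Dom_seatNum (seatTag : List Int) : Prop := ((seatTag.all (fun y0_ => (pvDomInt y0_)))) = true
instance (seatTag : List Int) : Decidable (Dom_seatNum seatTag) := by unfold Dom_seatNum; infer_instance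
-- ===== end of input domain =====

-- B replaces A's copy-greedy-then-diff simulation by run-length decomposition with a
-- closed-form count per maximal run of non-1 cells (objective: alternative algorithm).

-- ===== PORT A =====
-- the mutating for-loop of A over range(seatTagLen), acting on the copied list `cur`
def seatNumLoopA (n : Nat) (i : Nat) (cur : List Int) : List Int :=
  if _h : i < n then
    let cur' :=
      if i = 0 then
        if cur.getD 0 0 = 0 then
          if cur.getD 1 0 = 1 then cur else cur.set 0 1
        else cur
      else
        if cur.getD (i - 1) 0 = 1 then cur
        else if i + 1 ≤ n - 1 then
          if cur.getD (i + 1) 0 = 1 then cur else cur.set i 1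
        else cur.set i 1
    seatNumLoopA n (i + 1) cur'
  else cur
termination_by n - i

def seatNum (seatTag : List Int) : Int :=
  let seatTagLen := seatTag.length
  if seatTagLen = 0 then 0
  else if seatTagLen = 1 then
    (if seatTag.getD 0 0 = 0 then 1 else 0)
  else
    let seatTagNew := seatNumLoopA seatTagLen 0 seatTag
    (List.range seatTagLen).foldl
      (fun acc x => if seatTag.getD x 0 ≠ seatTagNew.getD x 0 then acc + 1 else acc) (0 : Int)

-- ===== PORT B =====
-- the inner `while j < n and seatTag[j] != 1` scan: length of the leading run of non-1 cells
def runLen : List Int → Nat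
  | [] => 0
  | v :: r => if v ≠ 1 then runLen r + 1 else 0

-- the rest of the list after that run (the suffix from index j on)
def runDrop : List Int → List Int
  | [] => []
  | v :: r => if v ≠ 1 then runDrop r else v :: r

theorem runDrop_length_le (l : List Int) : (runDrop l).length ≤ l.length := by
  induction l with
  | nil => simp [runDrop]
  | cons v r ih => simp only [runDrop]; split <;> simp <;> omega

-- outer while loop of B: per maximal run of non-1 cells of length L add
-- (L - 1 + left_open + right_open) // 2; atStart tracks `i == 0`
def seatNumRuns (l : List Int) (atStart : Bool) : Int :=
  match l with
  | [] => 0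
  | v :: r =>
    if v = 1 then seatNumRuns r false
    else
      let L : Nat := runLen r + 1
      let rest := runDrop r
      let lo : Nat := if atStart = true ∧ v = 0 then 1 else 0
      let ro : Nat := if rest.isEmpty then 1 else 0
      (((L - 1 + lo + ro) / 2 : Nat) : Int) + seatNumRuns rest false
termination_by l.length
decreasing_by
  · simp
  · have := runDrop_length_le r; simp; omega

def seatNum_alt (seatTag : List Int) : Int := seatNumRuns seatTag true

-- ===== PRECONDITION & SPEC =====
def Spec_seatNum (seatTag : List Int) (out : Int) : Prop := out = seatNum_alt seatTag
instance (seatTag : List Int) (out : Int) : Decidable (Spec_seatNum seatTag out) := by unfold Spec_seatNum; infer_instance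

-- ===== CLAIM (what is proved, stated in full; the proofs are below) =====
def Claim_equal_seatNum : Prop := ∀ (seatTag : List Int), Dom_seatNum seatTag → Spec_seatNum seatTag (seatNum seatTag)

-- ===== LEMMAS AND PROOFS =====

-- proof-only model of A's greedy: the transform A's loop performs on the suffix
-- starting at index i ≥ 1, given the effective value `prev` of cell i-1
def gTrans (prev : Int) : List Int → List Int
  | [] => []
  | v :: r =>
    if prev ≠ 1 ∧ (r = [] ∨ r.headD 0 ≠ 1) then 1 :: gTrans 1 r
    else v :: gTrans v r

-- pointwise diff count of two lists
def dCount : List Int → List Int → Int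
  | x :: xs, y :: ys => (if x ≠ y then 1 else 0) + dCount xs ys
  | _, _ => 0

-- proof-only fused single-pass form of A (stepping stone between A and B)
def seatNumLoopB (rest : List Int) (prev : Int) (count : Int) : Int :=
  match rest with
  | [] => count
  | v :: r =>
    if prev ≠ 1 ∧ (r = [] ∨ r.headD 0 ≠ 1) then
      seatNumLoopB r 1 (if v ≠ 1 then count + 1 else count)
    else seatNumLoopB r v count

def seatNumOld (seatTag : List Int) : Int :=
  match seatTag with
  | [] => 0
  | v :: rest =>
    let pc : Int × Int :=
      if v = 0 ∧ (rest = [] ∨ rest.headD 0 ≠ 1) then (1, 1) else (v, 0)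
    seatNumLoopB rest pc.1 pc.2

theorem gTrans_length (prev : Int) (l : List Int) : (gTrans prev l).length = l.length := by
  induction l generalizing prev with
  | nil => rfl
  | cons v r ih => simp only [gTrans]; split <;> simp [ih]

theorem getElem?_of_drop_cons (cur : List Int) (i : Nat) (v : Int) (r : List Int)
    (h : cur.drop i = v :: r) : cur[i]? = some v := by
  have := congrArg (fun l => l[0]?) h
  simpa [List.getElem?_drop] using this

theorem getD_of_drop_cons (cur : List Int) (i : Nat) (v : Int) (r : List Int)
    (h : cur.drop i = v :: r) : cur.getD i 0 = v := by
  rw [List.getD_eq_getElem?_getD, getElem?_of_drop_cons cur i v r h]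
  rfl

theorem drop_succ_of_drop_cons (cur : List Int) (i : Nat) (v : Int) (r : List Int)
    (h : cur.drop i = v :: r) : cur.drop (i + 1) = r := by
  have := congrArg List.tail h
  simpa [List.tail_drop] using this

theorem gTrans_cons_skip (prev v : Int) (r : List Int)
    (h : ¬(prev ≠ 1 ∧ (r = [] ∨ r.headD 0 ≠ 1))) : gTrans prev (v :: r) = v :: gTrans v r := by
  rw [gTrans, if_neg h]

theorem gTrans_cons_set (prev v : Int) (r : List Int)
    (h : prev ≠ 1 ∧ (r = [] ∨ r.headD 0 ≠ 1)) : gTrans prev (v :: r) = 1 :: gTrans 1 r := by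
  rw [gTrans, if_pos h]

theorem loopA_eq_gTrans (rest : List Int) : ∀ (i : Nat) (cur : List Int), 1 ≤ i →
    cur.length = i + rest.length → cur.drop i = rest →
    seatNumLoopA (i + rest.length) i cur = cur.take i ++ gTrans (cur.getD (i - 1) 0) rest := by
  induction rest with
  | nil =>
    intro i cur _ hlen hdrop
    simp only [List.length_nil, Nat.add_zero] at hlen
    rw [seatNumLoopA]
    rw [dif_neg (by simp)]
    simp [gTrans, ← hlen]
  | cons v r ih =>
    intro i cur hi hlen hdrop
    have hlt : i < i + (v :: r).length := by simp
    have hvi : cur.getD i 0 = v := getD_of_drop_cons cur i v r hdrop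
    rw [seatNumLoopA, dif_pos hlt, if_neg (by omega)]
    by_cases hp : cur.getD (i - 1) 0 = 1
    · rw [if_pos hp]
      have hstep := ih (i + 1) cur (by omega) (by simp at hlen ⊢; omega)
        (drop_succ_of_drop_cons cur i v r hdrop)
      have hn : i + (v :: r).length = (i + 1) + r.length := by simp; omega
      rw [hn, hstep]
      have htake : cur.take (i + 1) = cur.take i ++ [v] := by
        rw [List.take_succ]
        simp [getElem?_of_drop_cons cur i v _ hdrop]
      have hpi : cur.getD ((i + 1) - 1) 0 = v := by simpa using hvi
      rw [htake, hpi]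
      rw [gTrans_cons_skip _ _ _ (fun h => h.1 hp)]
      simp
    · rw [if_neg hp]
      have hnextcond : (i + 1 ≤ i + (v :: r).length - 1) ↔ r ≠ [] := by
        cases r with
        | nil => simp
        | cons a b => simp
      by_cases hr : r = []
      · subst hr
        rw [if_neg (by simp)]
        set cur' := cur.set i 1 with hc
        have hilen : i < cur.length := by simp at hlen; omega
        have hstep := ih (i + 1) cur' (by omega)
          (by rw [hc, List.length_set, hlen]; rfl)
          (by rw [hc, List.drop_set_of_lt (by omega)]
              exact drop_succ_of_drop_cons cur i v [] hdrop)
        have hn : i + ([v] : List Int).length = (i + 1) + ([] : List Int).length := by simp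
        rw [hn, hstep]
        have htake : cur'.take (i + 1) = cur.take i ++ [1] := by
          rw [List.take_succ]
          have h1 : cur'[i]? = some 1 := by
            simp [hc, hilen]
          rw [h1, hc, List.take_set_of_le (le_refl i)]
          rfl
        have hpi : cur'.getD ((i + 1) - 1) 0 = 1 := by
          simp [hc, List.getD_eq_getElem?_getD, hilen]
        rw [htake, hpi]
        rw [gTrans_cons_set _ _ _ ⟨hp, Or.inl rfl⟩]
        simp
      · rw [if_pos (hnextcond.mpr hr)]
        obtain ⟨w, r', rfl⟩ := List.exists_cons_of_ne_nil hr
        have hw : cur.getD (i + 1) 0 = w := by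
          apply getD_of_drop_cons
          rw [← List.drop_drop, hdrop]; rfl
        by_cases hw1 : w = 1
        · rw [if_pos (by rw [hw, hw1])]
          have hstep := ih (i + 1) cur (by omega) (by simp at hlen ⊢; omega)
            (drop_succ_of_drop_cons cur i v _ hdrop)
          have hn : i + (v :: w :: r').length = (i + 1) + (w :: r').length := by simp; omega
          rw [hn, hstep]
          have htake : cur.take (i + 1) = cur.take i ++ [v] := by
            rw [List.take_succ]
            simp [getElem?_of_drop_cons cur i v _ hdrop]
          have hpi : cur.getD ((i + 1) - 1) 0 = v := by simpa using hvi
          rw [htake, hpi]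
          rw [gTrans_cons_skip (cur.getD (i - 1) 0) v (w :: r') (by
            intro hcon
            rcases hcon.2 with he | hne
            · exact (List.cons_ne_nil _ _) he
            · exact hne (by simp [hw1]))]
          simp
        · rw [if_neg (by rw [hw]; exact hw1)]
          set cur' := cur.set i 1 with hc
          have hilen : i < cur.length := by simp at hlen; omega
          have hstep := ih (i + 1) cur' (by omega)
            (by rw [hc, List.length_set, hlen]; simp only [List.length_cons]; omega)
            (by rw [hc, List.drop_set_of_lt (by omega)]
                exact drop_succ_of_drop_cons cur i v _ hdrop)
          have hn : i + (v :: w :: r').length = (i + 1) + (w :: r').length := by simp; omega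
          rw [hn, hstep]
          have htake : cur'.take (i + 1) = cur.take i ++ [1] := by
            rw [List.take_succ]
            have h1 : cur'[i]? = some 1 := by simp [hc, hilen]
            rw [h1, hc, List.take_set_of_le (le_refl i)]
            rfl
          have hpi : cur'.getD ((i + 1) - 1) 0 = 1 := by
            simp [hc, List.getD_eq_getElem?_getD, hilen]
          rw [htake, hpi]
          rw [gTrans_cons_set _ _ _ ⟨hp, Or.inr (by simpa using hw1)⟩]
          simp

theorem loopB_eq_dCount (rest : List Int) : ∀ (prev count : Int),
    seatNumLoopB rest prev count = count + dCount rest (gTrans prev rest) := by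
  induction rest with
  | nil => intro prev count; simp [seatNumLoopB, dCount]
  | cons v r ih =>
    intro prev count
    simp only [seatNumLoopB, gTrans]
    by_cases hc : prev ≠ 1 ∧ (r = [] ∨ r.headD 0 ≠ 1)
    · rw [if_pos hc, if_pos hc, ih]
      simp only [dCount]
      by_cases hv : v = 1 <;> simp [hv] <;> ring
    · rw [if_neg hc, if_neg hc, ih]
      simp [dCount]

theorem foldl_range_diff (a b : List Int) : ∀ (c : Int), a.length = b.length →
    (List.range a.length).foldl
      (fun acc x => if a.getD x 0 ≠ b.getD x 0 then acc + 1 else acc) c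
      = c + dCount a b := by
  induction a generalizing b with
  | nil => intro c h; cases b <;> simp_all [dCount]
  | cons x xs ih =>
    intro c h
    cases b with
    | nil => simp at h
    | cons y ys =>
      simp only [List.length_cons, List.range_succ_eq_map, List.foldl_cons, List.foldl_map,
        List.getD_cons_succ, List.getD_cons_zero]
      have hrec := ih ys (if x ≠ y then c + 1 else c) (by simpa using h)
      rw [hrec]
      simp only [dCount, List.getD_cons_zero]
      by_cases hxy : x = y <;> simp [hxy] <;> ring

-- A equals the fused single-pass form
theorem seatNum_eq_old (seatTag : List Int) : seatNum seatTag = seatNumOld seatTag := by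
  match seatTag with
  | [] => rfl
  | [v] =>
    simp only [seatNum, seatNumOld, List.length_cons, List.length_nil]
    norm_num [seatNumLoopB]
    by_cases hv : v = 0 <;> simp [hv]
  | v :: w :: r =>
    have key : ∀ x : Int,
        seatNumLoopA (1 + (w :: r).length) 1 (x :: w :: r) = x :: gTrans x (w :: r) := by
      intro x
      have h := loopA_eq_gTrans (w :: r) 1 (x :: w :: r) (by omega) (by simp only [List.length_cons]; omega) rfl
      simpa using h
    have hlen2 : ((v :: w :: r).length) = 1 + (w :: r).length := by
      simp [Nat.add_comm]
    have hA : seatNumLoopA ((v :: w :: r).length) 0 (v :: w :: r)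
        = (if v = 0 ∧ w ≠ 1 then (1 : Int) else v)
          :: gTrans (if v = 0 ∧ w ≠ 1 then (1 : Int) else v) (w :: r) := by
      rw [seatNumLoopA.eq_def, dif_pos (by simp), if_pos rfl]
      simp only [List.getD_cons_zero, List.getD_cons_succ]
      by_cases hv0 : v = 0
      · by_cases hw1 : w = 1
        · rw [if_pos hv0, if_pos hw1, hlen2, show (0 + 1 : Nat) = 1 from rfl, key v,
            if_neg (by simp [hw1])]
        · rw [if_pos hv0, if_neg hw1,
            show (v :: w :: r).set 0 1 = (1 : Int) :: w :: r from rfl,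
            hlen2, show (0 + 1 : Nat) = 1 from rfl, key 1, if_pos ⟨hv0, hw1⟩]
      · rw [if_neg hv0, hlen2, show (0 + 1 : Nat) = 1 from rfl, key v,
          if_neg (by simp [hv0])]
    simp only [seatNum, seatNumOld]
    rw [if_neg (by simp), if_neg (by simp)]
    simp only [hA]
    rw [foldl_range_diff _ _ 0 (by simp [gTrans_length]), loopB_eq_dCount]
    by_cases hv0 : v = 0
    · by_cases hw1 : w = 1
      · rw [if_neg (by simp [hw1]), if_neg (by simp [hw1])]
        simp [dCount, hv0, hw1]
      · rw [if_pos ⟨hv0, hw1⟩, if_pos ⟨hv0, Or.inr (by simpa using hw1)⟩]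
        simp [dCount, hv0]
    · rw [if_neg (by simp [hv0]), if_neg (by simp [hv0])]
      simp [dCount]

-- a blocker cell is crossed without change, leaving prev = 1
theorem loopB_cons_one (t : List Int) (p c : Int) :
    seatNumLoopB (1 :: t) p c = seatNumLoopB t 1 c := by
  simp only [seatNumLoopB]
  split <;> simp

-- the fused pass computes exactly the per-run closed forms
theorem loopB_eq_runs (l : List Int) :
    (∀ c : Int, seatNumLoopB l 1 c = c + seatNumRuns l false) ∧
    (∀ (c p : Int), p ≠ 1 →
      seatNumLoopB l p c =
        c + (((runLen l + (if (runDrop l).isEmpty then 1 else 0)) / 2 : Nat) : Int)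
          + seatNumRuns (runDrop l) false) := by
  induction l with
  | nil =>
    constructor
    · intro c; simp [seatNumLoopB, seatNumRuns]
    · intro c p _; simp [seatNumLoopB, runLen, runDrop, seatNumRuns]
  | cons v r ih =>
    by_cases hv : v = 1
    · subst hv
      constructor
      · intro c
        rw [loopB_cons_one, ih.1 c]
        simp [seatNumRuns]
      · intro c p hp
        rw [loopB_cons_one, ih.1 c]
        simp [runLen, runDrop, seatNumRuns]
    · constructor
      · intro c
        have h1 : seatNumLoopB (v :: r) 1 c = seatNumLoopB r v c := by
          simp [seatNumLoopB]
        rw [h1, ih.2 c v hv]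
        simp only [seatNumRuns, if_neg hv, Nat.add_sub_cancel]
        norm_num [add_assoc]
      · intro c p hp
        match r with
        | [] =>
          have hcond : seatNumLoopB (v :: ([] : List Int)) p c = c + 1 := by
            simp [seatNumLoopB, hp, hv]
          rw [hcond]
          simp [runLen, runDrop, seatNumRuns, hv]
        | w :: t =>
          by_cases hw : w = 1
          · subst hw
            have hcond : seatNumLoopB (v :: (1 : Int) :: t) p c
                = seatNumLoopB ((1 : Int) :: t) v c := by
              simp [seatNumLoopB]
            rw [hcond, ih.2 c v hv]
            simp [runLen, runDrop, seatNumRuns, hv]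
          · have hcond : seatNumLoopB (v :: w :: t) p c
                = seatNumLoopB (w :: t) 1 (c + 1) := by
              simp [seatNumLoopB, hp, hv, hw]
            rw [hcond, ih.1 (c + 1)]
            simp only [seatNumRuns, if_neg hw, if_neg hv, runLen, runDrop, if_pos hv, if_pos hw,
              Nat.add_sub_cancel]
            generalize seatNumRuns (runDrop t) false = S
            by_cases hro : (runDrop t).isEmpty = true <;> simp [hro] <;> omega

-- the fused pass equals B: closed forms per run
theorem old_eq_new (l : List Int) : seatNumOld l = seatNumRuns l true := by
  match l with
  | [] => simp [seatNumOld, seatNumRuns]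
  | v :: r =>
    by_cases hv : v = 1
    · subst hv
      simp only [seatNumOld, if_neg (by simp : ¬((1 : Int) = 0 ∧ (r = [] ∨ r.headD 0 ≠ 1)))]
      rw [(loopB_eq_runs r).1 0]
      simp [seatNumRuns]
    · by_cases hc : v = 0 ∧ (r = [] ∨ r.headD 0 ≠ 1)
      · simp only [seatNumOld, if_pos hc]
        rw [(loopB_eq_runs r).1 1]
        match r, hc.2 with
        | [], _ =>
          simp [seatNumRuns, runLen, runDrop, hc.1]
        | w :: t, h2 =>
          have hw : w ≠ 1 := by
            rcases h2 with h | h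
            · exact absurd h (by simp)
            · simpa using h
          have hw' : ¬w = 1 := by simpa using hw
          simp only [seatNumRuns, if_neg hw', if_neg hv, runLen, runDrop, if_pos hv,
            if_pos (by simpa using hw : w ≠ 1), Nat.add_sub_cancel]
          generalize seatNumRuns (runDrop t) false = S
          by_cases hro : (runDrop t).isEmpty = true <;> simp [hro, hc.1] <;> omega
      · simp only [seatNumOld, if_neg hc]
        rw [(loopB_eq_runs r).2 0 v hv]
        by_cases hv0 : v = 0
        · have hr : ∃ w t, r = w :: t ∧ w = 1 := by
            rcases r with _ | ⟨w, t⟩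
            · exact absurd ⟨hv0, Or.inl rfl⟩ hc
            · refine ⟨w, t, rfl, ?_⟩
              by_contra hw
              exact hc ⟨hv0, Or.inr (by simpa using hw)⟩
          obtain ⟨w, t, rfl, rfl⟩ := hr
          simp [seatNumRuns, runLen, runDrop, hv, hv0]
        · simp only [seatNumRuns, if_neg hv, Nat.add_sub_cancel]
          simp [hv0]

-- ===== VERDICT (by name: the statement is the Claim_ definition above) =====
theorem seatNum_spec : Claim_equal_seatNum := by
  intro seatTag _
  show seatNum seatTag = seatNum_alt seatTag
  rw [seatNum_eq_old, old_eq_new]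
  rfl
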